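-- pv_equiv track=rewrite | github.com/augelloantonio/dl_file_builder | ecg_processing/detection_copy.py | countAnomalies
-- ===== SOURCE A (Python) =====
-- def countAnomalies(beatClassificationList, peaks):
--
--     count_n = 0
--     count_pvc = 0
--     count_escape_beats = 0
--     count_fib = 0
--     count_extrabeat = 0
--
--     dict_cat = {}
--
--     for index, val in enumerate(beatClassificationList):
--         if index<=len(peaks):
--             if val == "N":
--                 count_n += 1
--             if val == "escape beat":
--                 count_escape_beats += 1
--             if val == "ventricular premature beats":
--                 count_pvc += 1
--             if val == "vf/vt":
--                 count_fib += 1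
--             if val == "atrial/nodal/supraventricular beat":
--                 count_extrabeat += 1
--
--     dict_cat = {"cat_1":count_n,"cat_2":count_extrabeat,"cat_3":count_pvc,"cat_4":count_escape_beats,"cat_5":count_fib}
--
--     return dict_cat
-- ===== SOURCE B (Python) =====
-- def countAnomalies(beatClassificationList, peaks):
--     # count only the prefix with index <= len(peaks), then one count() pass per category
--     prefix = beatClassificationList[:len(peaks) + 1]
--     return {
--         "cat_1": prefix.count("N"),
--         "cat_2": prefix.count("atrial/nodal/supraventricular beat"),
--         "cat_3": prefix.count("ventricular premature beats"),
--         "cat_4": prefix.count("escape beat"),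
--         "cat_5": prefix.count("vf/vt"),
--     }
-- ===== Notes on version B (the rewrite author's own statement) =====
-- stated objective: idiomatic
-- what changed: Replaces the single loop with five per-element if-branches and counter variables by slicing the counted prefix beatClassificationList[:len(peaks)+1] once and calling list.count for each of the five category labels.
import Mathlib
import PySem

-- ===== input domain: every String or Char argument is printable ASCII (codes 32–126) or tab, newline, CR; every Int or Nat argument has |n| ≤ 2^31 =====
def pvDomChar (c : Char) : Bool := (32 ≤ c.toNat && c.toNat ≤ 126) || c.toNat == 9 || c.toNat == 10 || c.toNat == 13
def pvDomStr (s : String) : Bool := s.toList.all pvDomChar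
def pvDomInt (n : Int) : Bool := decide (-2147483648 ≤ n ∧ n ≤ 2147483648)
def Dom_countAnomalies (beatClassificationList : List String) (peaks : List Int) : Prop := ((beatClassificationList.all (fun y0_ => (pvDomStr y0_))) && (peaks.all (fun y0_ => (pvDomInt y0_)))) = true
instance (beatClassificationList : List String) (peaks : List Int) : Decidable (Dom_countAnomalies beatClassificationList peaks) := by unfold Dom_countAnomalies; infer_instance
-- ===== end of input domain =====

-- B replaces A's branching loop with one pref slice plus five list.count passes (idiomatic, same cost).

-- ===== PORT A =====
-- one loop over enumerate(beatClassificationList); five counters, incremented when index <= len(peaks)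
def countAnomalies (beatClassificationList : List String) (peaks : List Int) : List (String × Int) :=
  let st :=
    (PySem.List.enumerate beatClassificationList).foldl
      (fun (c : Int × Int × Int × Int × Int) (p : Int × String) =>
        if p.1 ≤ PySem.List.len peaks then
          (c.1 + (if p.2 = "N" then 1 else 0),
           c.2.1 + (if p.2 = "escape beat" then 1 else 0),
           c.2.2.1 + (if p.2 = "ventricular premature beats" then 1 else 0),
           c.2.2.2.1 + (if p.2 = "vf/vt" then 1 else 0),
           c.2.2.2.2 + (if p.2 = "atrial/nodal/supraventricular beat" then 1 else 0))
        else c)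
      (0, 0, 0, 0, 0)
  [("cat_1", st.1), ("cat_2", st.2.2.2.2), ("cat_3", st.2.2.1), ("cat_4", st.2.1), ("cat_5", st.2.2.2.1)]

-- ===== PORT B =====
-- beatClassificationList[:len(peaks)+1] = take of (len(peaks)+1) elements (nonnegative upper bound); list.count = PySem.List.count
def countAnomalies_alt (beatClassificationList : List String) (peaks : List Int) : List (String × Int) :=
  let pref := beatClassificationList.take (peaks.length + 1)
  [("cat_1", (PySem.List.count pref "N" : Int)),
   ("cat_2", (PySem.List.count pref "atrial/nodal/supraventricular beat" : Int)),
   ("cat_3", (PySem.List.count pref "ventricular premature beats" : Int)),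
   ("cat_4", (PySem.List.count pref "escape beat" : Int)),
   ("cat_5", (PySem.List.count pref "vf/vt" : Int))]

-- ===== PRECONDITION & SPEC =====
def Spec_countAnomalies (beatClassificationList : List String) (peaks : List Int) (out : List (String × Int)) : Prop := out = countAnomalies_alt beatClassificationList peaks
instance (beatClassificationList : List String) (peaks : List Int) (out : List (String × Int)) : Decidable (Spec_countAnomalies beatClassificationList peaks out) := by unfold Spec_countAnomalies; infer_instance

-- ===== CLAIM (what is proved, stated in full; the proofs are below) =====
def Claim_equal_countAnomalies : Prop := ∀ (beatClassificationList : List String) (peaks : List Int), Dom_countAnomalies beatClassificationList peaks → Spec_countAnomalies beatClassificationList peaks (countAnomalies beatClassificationList peaks)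

-- ===== LEMMAS AND PROOFS =====

-- A's loop starting at index s adds, to each accumulator, the count of its label in the
-- pref of the remaining list that still satisfies index ≤ L (i.e. the first (L+1-s).toNat elements).
theorem countAnomalies_loop (l : List String) (L : Int) (s : Int)
    (n esc pvc fib ex : Int) :
    (PySem.List.enumerate l s).foldl
      (fun (c : Int × Int × Int × Int × Int) (p : Int × String) =>
        if p.1 ≤ L then
          (c.1 + (if p.2 = "N" then 1 else 0),
           c.2.1 + (if p.2 = "escape beat" then 1 else 0),
           c.2.2.1 + (if p.2 = "ventricular premature beats" then 1 else 0),
           c.2.2.2.1 + (if p.2 = "vf/vt" then 1 else 0),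
           c.2.2.2.2 + (if p.2 = "atrial/nodal/supraventricular beat" then 1 else 0))
        else c)
      (n, esc, pvc, fib, ex)
      = (n + (PySem.List.count (l.take (L + 1 - s).toNat) "N" : Int),
         esc + (PySem.List.count (l.take (L + 1 - s).toNat) "escape beat" : Int),
         pvc + (PySem.List.count (l.take (L + 1 - s).toNat) "ventricular premature beats" : Int),
         fib + (PySem.List.count (l.take (L + 1 - s).toNat) "vf/vt" : Int),
         ex + (PySem.List.count (l.take (L + 1 - s).toNat) "atrial/nodal/supraventricular beat" : Int)) := by
  induction l generalizing s n esc pvc fib ex with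
  | nil => simp [PySem.List.count]
  | cons x xs ih =>
    rw [PySem.List.enumerate_cons]
    by_cases h : s ≤ L
    · have htn : (L + 1 - s).toNat = (L + 1 - (s + 1)).toNat + 1 := by omega
      simp only [List.foldl_cons, if_pos h, htn, List.take_succ_cons, ih,
        PySem.List.count, List.count_cons, Prod.mk.injEq]
      refine ⟨?_, ?_, ?_, ?_, ?_⟩ <;> push_cast <;> split_ifs with h1 h2 <;>
        simp_all <;> push_cast <;> ring
    · have h0 : (L + 1 - s).toNat = 0 := by omega
      have h0' : (L + 1 - (s + 1)).toNat = 0 := by omega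
      simp only [List.foldl_cons, if_neg h, ih, h0, h0', List.take_zero]

-- ===== VERDICT (by name: the statement is the Claim_ definition above) =====
theorem countAnomalies_spec : Claim_equal_countAnomalies := by
  intro l peaks _
  show countAnomalies l peaks = countAnomalies_alt l peaks
  unfold countAnomalies countAnomalies_alt
  rw [show PySem.List.enumerate l = PySem.List.enumerate l 0 from rfl,
      countAnomalies_loop l (PySem.List.len peaks) 0]
  simp [PySem.List.len, PySem.List.count]
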